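-- pv_equiv track=rewrite | github.com/baoshuxu/opensipi | support/ibis.py | ibs_brackets
-- ===== SOURCE A (Python) =====
-- def ibs_key(line, key):
-- 	if not key in line:
-- 		raise Warning(f'{key} not in "{line}"')
-- 	return line.replace(key, "").strip()
--
-- def ibs_brackets(text, enclose, bracket=None):
-- 	pieces = {}
-- 	start = enclose[0]
-- 	end = [enclose[1]] if isinstance(enclose[1], str) else enclose[1]
-- 	m, b = (0, False)
-- 	if bracket is None:
-- 		bracket = range(len(text))
-- 	for i in bracket:
-- 		s = text[i]
-- 		if s.startswith(start):
-- 			if b and i > m: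
-- 				kw = ibs_key(text[m], start)
-- 				pieces[kw] = {"text": text[m:i]}
-- 			m, b = (i, True)
-- 		elif any(s.startswith(x) for x in end):
-- 			if b:
-- 				kw = ibs_key(text[m], start)
-- 				pieces[kw] = {"text": text[m:i]}
-- 			m, b = (i, False)
-- 	return pieces
-- ===== SOURCE B (Python) =====
-- def ibs_key(line, key):
-- 	if not key in line:
-- 		raise Warning(f'{key} not in "{line}"')
-- 	return line.replace(key, "").strip()
--
-- def ibs_brackets(text, enclose, bracket=None):
-- 	# Two-phase: collect boundary records first, then emit sections from
-- 	# consecutive boundary pairs (start followed by any boundary further right,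
-- 	# or by an end anywhere).
-- 	start = enclose[0]
-- 	ends = [enclose[1]] if isinstance(enclose[1], str) else enclose[1]
-- 	idxs = range(len(text)) if bracket is None else bracket
-- 	bounds = []
-- 	for i in idxs:
-- 		s = text[i]
-- 		if s.startswith(start):
-- 			bounds.append((i, True))
-- 		elif any(s.startswith(x) for x in ends):
-- 			bounds.append((i, False))
-- 	pieces = {}
-- 	for (m, m_is_start), (i, i_is_start) in zip(bounds, bounds[1:]):
-- 		if m_is_start and (not i_is_start or m < i):
-- 			pieces[ibs_key(text[m], start)] = {"text": text[m:i]}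
-- 	return pieces
-- ===== Notes on version B (the rewrite author's own statement) =====
-- stated objective: alternative
-- what changed: Replaces A's single stateful scan with (m,b) carry-flags by a two-phase decomposition: first collect a list of boundary records (index, is_start), then emit sections by folding over consecutive boundary pairs via zip.
import Mathlib
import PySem

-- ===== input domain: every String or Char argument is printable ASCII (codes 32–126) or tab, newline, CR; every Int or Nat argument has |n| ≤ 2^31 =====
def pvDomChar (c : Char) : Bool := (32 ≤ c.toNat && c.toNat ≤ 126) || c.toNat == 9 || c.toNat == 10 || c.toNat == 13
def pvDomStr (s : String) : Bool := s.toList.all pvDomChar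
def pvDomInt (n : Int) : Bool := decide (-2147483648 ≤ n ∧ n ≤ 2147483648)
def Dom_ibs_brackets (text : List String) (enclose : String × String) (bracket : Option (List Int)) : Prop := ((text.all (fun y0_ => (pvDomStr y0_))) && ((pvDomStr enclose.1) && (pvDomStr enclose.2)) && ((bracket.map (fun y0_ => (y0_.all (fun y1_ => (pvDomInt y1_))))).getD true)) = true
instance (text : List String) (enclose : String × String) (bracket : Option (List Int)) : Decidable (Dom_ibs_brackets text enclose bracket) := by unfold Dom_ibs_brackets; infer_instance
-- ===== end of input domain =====

-- B replaces A's single stateful (m,b)-carrying scan by a two-phase decomposition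
-- (collect boundary records, then fold over consecutive boundary pairs): alternative, same cost.


-- ===== PORT A =====
-- ibs_key: the 'key not in line' Warning branch is ported with a "" result; it is
-- unreachable from ibs_brackets (text[m] always startswith start there).
def ibs_key (line key : String) : String :=
  if !PySem.Str.isIn key line then ""
  else PySem.Str.strip (PySem.Str.replace line key "")

-- loop body of A's for-loop, state (pieces, m, b); text[i] via pyGet? (IndexError excluded by Pre_)
def ibsStepA (text : List String) (start : String) (ends : List String)
    (st : PySem.Dict String (List (String × List String)) × Int × Bool) (i : Int) :
    PySem.Dict String (List (String × List String)) × Int × Bool :=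
  let (pieces, m, b) := st
  let s := (PySem.List.pyGet? text i).getD ""
  if PySem.Str.startswith s start then
    let pieces := if b && decide (m < i) then
        pieces.insert (ibs_key ((PySem.List.pyGet? text m).getD "") start)
          [("text", PySem.List.slice text (some m) (some i))]
      else pieces
    (pieces, i, true)
  else if ends.any (fun x => PySem.Str.startswith s x) then
    let pieces := if b then
        pieces.insert (ibs_key ((PySem.List.pyGet? text m).getD "") start)
          [("text", PySem.List.slice text (some m) (some i))]
      else pieces
    (pieces, i, false)
  else st

def ibs_brackets (text : List String) (enclose : String × String) (bracket : Option (List Int)) : List (String × List (String × List String)) :=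
  let start := enclose.1
  let ends := [enclose.2]
  let idxs := match bracket with
    | none => PySem.List.pyRange 0 (text.length : Int) 1
    | some l => l
  ((idxs.foldl (ibsStepA text start ends) (PySem.Dict.empty, 0, false)).1).items

-- ===== PORT B =====
-- phase 1: boundary records (index, is_start)
def ibsBounds (text : List String) (start : String) (ends : List String) (idxs : List Int) : List (Int × Bool) :=
  idxs.filterMap (fun i =>
    let s := (PySem.List.pyGet? text i).getD ""
    if PySem.Str.startswith s start then some (i, true)
    else if ends.any (fun x => PySem.Str.startswith s x) then some (i, false)
    else none)

-- phase 2: emit a section from one consecutive boundary pair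
def ibsEmit (text : List String) (start : String)
    (pieces : PySem.Dict String (List (String × List String))) (p : (Int × Bool) × (Int × Bool)) :
    PySem.Dict String (List (String × List String)) :=
  if p.1.2 && (!p.2.2 || decide (p.1.1 < p.2.1)) then
    pieces.insert (ibs_key ((PySem.List.pyGet? text p.1.1).getD "") start)
      [("text", PySem.List.slice text (some p.1.1) (some p.2.1))]
  else pieces

def ibs_brackets_alt (text : List String) (enclose : String × String) (bracket : Option (List Int)) : List (String × List (String × List String)) :=
  let start := enclose.1
  let ends := [enclose.2]
  let idxs := match bracket with
    | none => PySem.List.pyRange 0 (text.length : Int) 1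
    | some l => l
  let bounds := ibsBounds text start ends idxs
  ((bounds.zip bounds.tail).foldl (ibsEmit text start) PySem.Dict.empty).items

-- ===== PRECONDITION & SPEC =====
-- Pre_ excludes exactly the inputs where Python A raises IndexError: a custom
-- bracket containing an index outside [-len(text), len(text)).
def Pre_ibs_brackets (text : List String) (enclose : String × String) (bracket : Option (List Int)) : Prop :=
  ∀ i ∈ bracket.getD [], PySem.Raise.InRange text.length i
instance (text : List String) (enclose : String × String) (bracket : Option (List Int)) : Decidable (Pre_ibs_brackets text enclose bracket) := by unfold Pre_ibs_brackets; infer_instance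

def pvWitness_ibs_brackets : List String × (String × String) × Option (List Int) :=
  (["[Model a", "line 1", "|End", "[Model b", "x", "|End"], ("[", "|"), none)

def Spec_ibs_brackets (text : List String) (enclose : String × String) (bracket : Option (List Int)) (out : List (String × List (String × List String))) : Prop := out = ibs_brackets_alt text enclose bracket
instance (text : List String) (enclose : String × String) (bracket : Option (List Int)) (out : List (String × List (String × List String))) : Decidable (Spec_ibs_brackets text enclose bracket out) := by unfold Spec_ibs_brackets; infer_instance

-- ===== CLAIM (what is proved, stated in full; the proofs are below) =====
def Claim_equal_ibs_brackets : Prop := ∀ (text : List String) (enclose : String × String) (bracket : Option (List Int)), Dom_ibs_brackets text enclose bracket → Pre_ibs_brackets text enclose bracket → Spec_ibs_brackets text enclose bracket (ibs_brackets text enclose bracket)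

-- ===== LEMMAS AND PROOFS =====

-- main invariant: A's fold from state (d, m, b) equals B's pair-fold seeded with
-- the virtual boundary (m, b) prepended to the boundary list of the remaining indices.
theorem ibs_main (text : List String) (start : String) (ends : List String) :
    ∀ (idxs : List Int) (d : PySem.Dict String (List (String × List String))) (m : Int) (b : Bool),
      (idxs.foldl (ibsStepA text start ends) (d, m, b)).1 =
      (((((m, b) :: ibsBounds text start ends idxs)).zip ((m, b) :: ibsBounds text start ends idxs).tail).foldl
        (ibsEmit text start) d) := by
  intro idxs
  induction idxs with
  | nil => intro d m b; simp [ibsBounds]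
  | cons i rest ih =>
    intro d m b
    show ((rest.foldl (ibsStepA text start ends) (ibsStepA text start ends (d, m, b) i))).1 = _
    by_cases h1 : PySem.Str.startswith ((PySem.List.pyGet? text i).getD "") start = true
    · have hb : ibsBounds text start ends (i :: rest) = (i, true) :: ibsBounds text start ends rest := by
        simp only [ibsBounds, List.filterMap_cons]
        rw [if_pos h1]
      have hs : ibsStepA text start ends (d, m, b) i =
          (ibsEmit text start d ((m, b), (i, true)), i, true) := by
        simp only [ibsStepA, ibsEmit]
        rw [if_pos h1]
        simp
      rw [hs, ih, hb]
      simp [List.zip]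
    · by_cases h2 : (ends.any (fun x => PySem.Str.startswith ((PySem.List.pyGet? text i).getD "") x)) = true
      · have hb : ibsBounds text start ends (i :: rest) = (i, false) :: ibsBounds text start ends rest := by
          simp only [ibsBounds, List.filterMap_cons]
          rw [if_neg h1, if_pos h2]
        have hs : ibsStepA text start ends (d, m, b) i =
            (ibsEmit text start d ((m, b), (i, false)), i, false) := by
          simp only [ibsStepA, ibsEmit]
          rw [if_neg h1, if_pos h2]
          simp
        rw [hs, ih, hb]
        simp [List.zip]
      · have hb : ibsBounds text start ends (i :: rest) = ibsBounds text start ends rest := by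
          simp only [ibsBounds, List.filterMap_cons]
          rw [if_neg h1, if_neg h2]
        have hs : ibsStepA text start ends (d, m, b) i = (d, m, b) := by
          simp only [ibsStepA]
          rw [if_neg h1, if_neg h2]
        rw [hs, ih, hb]

-- dropping the virtual initial boundary (0, false) changes nothing: its emit is a no-op.
theorem ibs_drop_head (text : List String) (start : String) (bs : List (Int × Bool)) :
    ((((0, false) :: bs)).zip (((0, false) : Int × Bool) :: bs).tail).foldl (ibsEmit text start) PySem.Dict.empty =
    (bs.zip bs.tail).foldl (ibsEmit text start) PySem.Dict.empty := by
  cases bs with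
  | nil => rfl
  | cons y t =>
    have h0 : ibsEmit text start PySem.Dict.empty ((0, false), y) = PySem.Dict.empty := by
      simp [ibsEmit]
    simp only [List.tail_cons, List.zip_cons_cons, List.foldl_cons, h0]

-- ===== VERDICT (by name: the statement is the Claim_ definition above) =====
theorem ibs_brackets_spec : Claim_equal_ibs_brackets := by
  intro text enclose bracket _ _
  show ibs_brackets text enclose bracket = ibs_brackets_alt text enclose bracket
  cases bracket with
  | none =>
    exact congrArg PySem.Dict.items
      ((ibs_main text enclose.1 [enclose.2] (PySem.List.pyRange 0 (text.length : Int) 1)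
          PySem.Dict.empty 0 false).trans (ibs_drop_head text enclose.1 _))
  | some l =>
    exact congrArg PySem.Dict.items
      ((ibs_main text enclose.1 [enclose.2] l PySem.Dict.empty 0 false).trans
        (ibs_drop_head text enclose.1 _))
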